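-- pv_equiv track=rewrite | github.com/prerbazz/CSA0605-DAA | Pdf 41 - Containers.py | max_loaded_weight
-- ===== SOURCE A (Python) =====
-- def max_loaded_weight(weights, max_capacity):
--     weights.sort(reverse=True)
--     total_weight = 0
--     for weight in weights:
--         if total_weight + weight <= max_capacity:
--             total_weight += weight
--         else:
--             break
--     return total_weight
-- ===== SOURCE B (Python) =====
-- def max_loaded_weight(weights, max_capacity):
--     # Selection-based greedy: no sort at all; repeatedly extract the current
--     # maximum while it still fits.  Works on a copy, so unlike A it does not
--     # mutate `weights` (return-value equivalence).
--     remaining = list(weights)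
--     total = 0
--     while remaining:
--         m = max(remaining)
--         if total + m > max_capacity:
--             break
--         total += m
--         remaining.remove(m)
--     return total
-- ===== Notes on version B (the rewrite author's own statement) =====
-- stated objective: alternative
-- what changed: Replaces sort-then-scan with a selection-based greedy: no sorting pass at all; instead it repeatedly extracts the current maximum of the remaining multiset (max + remove) while it still fits under the capacity; also B does not mutate the input list (A sorts it in place).
import Mathlib
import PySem

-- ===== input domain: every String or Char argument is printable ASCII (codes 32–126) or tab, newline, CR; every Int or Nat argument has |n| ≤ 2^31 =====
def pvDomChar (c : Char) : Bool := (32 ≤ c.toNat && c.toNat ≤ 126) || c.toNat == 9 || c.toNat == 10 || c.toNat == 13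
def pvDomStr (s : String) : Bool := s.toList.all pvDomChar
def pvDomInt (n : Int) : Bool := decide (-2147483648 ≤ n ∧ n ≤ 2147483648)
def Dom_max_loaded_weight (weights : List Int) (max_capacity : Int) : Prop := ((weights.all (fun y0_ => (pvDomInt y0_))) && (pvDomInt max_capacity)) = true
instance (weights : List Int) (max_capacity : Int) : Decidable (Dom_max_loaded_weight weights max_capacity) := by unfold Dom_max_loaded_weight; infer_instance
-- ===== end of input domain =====

-- B replaces A's sort-then-greedy-scan by a selection-based greedy (repeatedly extract the
-- current maximum while it fits; no sorting pass); return-value equivalence only: A sorts the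
-- argument in place, B works on a copy and leaves it untouched.


-- ===== PORT A =====
-- A's for-loop with break: accumulate while total + weight ≤ cap, stop at the first failure
def mlwLoop (cap : Int) : List Int → Int → Int
  | [], t => t
  | w :: ws, t => if t + w ≤ cap then mlwLoop cap ws (t + w) else t

def max_loaded_weight (weights : List Int) (max_capacity : Int) : Int :=
  mlwLoop max_capacity (PySem.List.sorted weights (fun x => x) true) 0

-- ===== PORT B =====
-- max(remaining) is found and, inside selLoop, removed; needed by the termination argument
theorem selMax_mem (x : Int) (xs : List Int) :
    ((PySem.List.max? (x :: xs) (fun y => y)).getD 0) ∈ x :: xs := by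
  rcases h : PySem.List.max? (x :: xs) (fun y => y) with _ | m
  · exact absurd (Iff.mp (PySem.List.max?_eq_none_iff _ _) h) (by simp)
  · simpa using PySem.List.max?_mem h

theorem erase_max_length_lt (x : Int) (xs : List Int) :
    ((x :: xs).erase ((PySem.List.max? (x :: xs) (fun y => y)).getD 0)).length <
      (x :: xs).length := by
  have h1 := List.length_erase_of_mem (selMax_mem x xs)
  simp at h1 ⊢
  omega

-- B's while-loop: m = max(remaining); break if it overflows; else add it and remove it.
-- max(remaining) raises only on [], handled by the match; remaining.remove(m) always
-- succeeds since m ∈ remaining, so it is ported exactly as List.erase (first occurrence).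
def selLoop (cap : Int) : List Int → Int → Int
  | [], total => total
  | x :: xs, total =>
    let m := (PySem.List.max? (x :: xs) (fun y => y)).getD 0
    if cap < total + m then total
    else selLoop cap ((x :: xs).erase m) (total + m)
termination_by l _ => l.length
decreasing_by
  exact erase_max_length_lt x xs

def max_loaded_weight_alt (weights : List Int) (max_capacity : Int) : Int :=
  selLoop max_capacity weights 0

-- ===== PRECONDITION & SPEC =====
def Spec_max_loaded_weight (weights : List Int) (max_capacity : Int) (out : Int) : Prop := out = max_loaded_weight_alt weights max_capacity
instance (weights : List Int) (max_capacity : Int) (out : Int) : Decidable (Spec_max_loaded_weight weights max_capacity out) := by unfold Spec_max_loaded_weight; infer_instance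

-- ===== CLAIM (what is proved, stated in full; the proofs are below) =====
def Claim_equal_max_loaded_weight : Prop := ∀ (weights : List Int) (max_capacity : Int), Dom_max_loaded_weight weights max_capacity → Spec_max_loaded_weight weights max_capacity (max_loaded_weight weights max_capacity)

-- ===== LEMMAS AND PROOFS =====

-- the first maximal element is an upper bound of the list
theorem selMax_isMax (x : Int) (xs : List Int) :
    ∀ y ∈ x :: xs, y ≤ (PySem.List.max? (x :: xs) (fun y => y)).getD 0 := by
  rcases h : PySem.List.max? (x :: xs) (fun y => y) with _ | m
  · exact absurd (Iff.mp (PySem.List.max?_eq_none_iff _ _) h) (by simp)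
  · simpa using PySem.List.max?_isMax h

-- sorting a nonempty list descending = its maximum consed onto the descending sort of the rest
theorem sorted_desc_cons_max (x : Int) (xs : List Int) :
    PySem.List.sorted (x :: xs) (fun y => y) true =
      ((PySem.List.max? (x :: xs) (fun y => y)).getD 0) ::
        PySem.List.sorted ((x :: xs).erase ((PySem.List.max? (x :: xs) (fun y => y)).getD 0))
          (fun y => y) true := by
  set m := (PySem.List.max? (x :: xs) (fun y => y)).getD 0 with hm
  refine List.Perm.eq_of_pairwise (le := fun a b : Int => b ≤ a)
    (fun a b _ _ h1 h2 => le_antisymm h2 h1) ?_ ?_ ?_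
  · simpa using PySem.List.sorted_pairwise_rev (x :: xs) (fun y => y)
  · refine List.Pairwise.cons ?_ ?_
    · intro y hy
      have : y ∈ (x :: xs).erase m :=
        ((PySem.List.mem_sorted ((x :: xs).erase m) (fun y => y) true y)).mp hy
      exact selMax_isMax x xs y (List.mem_of_mem_erase this)
    · simpa using PySem.List.sorted_pairwise_rev ((x :: xs).erase m) (fun y => y)
  · exact List.Perm.trans (PySem.List.sorted_perm ..)
      (List.Perm.trans (List.perm_cons_erase (selMax_mem x xs))
        (List.Perm.cons m (PySem.List.sorted_perm ..)).symm)

-- A's scan over the descending sort equals B's selection loop, from any accumulator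
theorem mlwLoop_sorted_eq_selLoop (cap : Int) (l : List Int) (t : Int) :
    mlwLoop cap (PySem.List.sorted l (fun x => x) true) t = selLoop cap l t := by
  match l with
  | [] => simp [mlwLoop, selLoop, PySem.List.sorted]
  | x :: xs =>
    rw [sorted_desc_cons_max x xs, selLoop]
    set m := (PySem.List.max? (x :: xs) (fun y => y)).getD 0 with hm
    simp only [mlwLoop]
    by_cases h : t + m ≤ cap
    · rw [if_pos h, if_neg (by omega)]
      exact mlwLoop_sorted_eq_selLoop cap ((x :: xs).erase m) (t + m)
    · rw [if_neg h, if_pos (by omega)]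
termination_by l.length
decreasing_by
  exact erase_max_length_lt x xs

-- ===== VERDICT (by name: the statement is the Claim_ definition above) =====
theorem max_loaded_weight_spec : Claim_equal_max_loaded_weight := by
  intro weights cap _
  unfold Spec_max_loaded_weight max_loaded_weight max_loaded_weight_alt
  exact mlwLoop_sorted_eq_selLoop cap weights 0
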